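-- pv_equiv track=rewrite | github.com/Cyril-Grl/Sport_Tournament_Sheduling_metaheuristique | src/outils.py | matrice_incoherences_periode
-- ===== SOURCE A (Python) =====
-- def matrice_incoherences_periode(m_t, n, matrice_incoherences=None):
--     if not matrice_incoherences:
--         matrice_incoherences = [[0] * (n - 1) for _ in range(n // 2)]
--     for num_p, periode in enumerate(m_t):
--         present = [0] * n
--         for a, b in periode:
--             present[a] += 1
--             present[b] += 1
--         inco = [0 if v <= 2 else v - 2 for v in present]
--         for num_s, ab in enumerate(periode):
--             a, b = ab
--             matrice_incoherences[num_p][num_s] += (inco[a] > 0) + (inco[b] > 0)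
--     return matrice_incoherences
-- ===== SOURCE B (Python) =====
-- def matrice_incoherences_periode(m_t, n, matrice_incoherences=None):
--     if not matrice_incoherences:
--         matrice_incoherences = [[0] * (n - 1) for _ in range(n // 2)]
--     for num_p, periode in enumerate(m_t):
--         # for each team index, the list of slot indices where it plays (with multiplicity)
--         slots = [[] for _ in range(n)]
--         for num_s, (a, b) in enumerate(periode):
--             slots[a].append(num_s)
--             slots[b].append(num_s)
--         for team_slots in slots:
--             if len(team_slots) > 2:
--                 for s in team_slots:
--                     matrice_incoherences[num_p][s] += 1
--     return matrice_incoherences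
-- ===== Notes on version B (the rewrite author's own statement) =====
-- stated objective: alternative
-- what changed: A scores each match slot by checking both endpoints' overload after a per-period presence count; B inverts the traversal: it builds, in one pass, a per-team list of the slots where the team plays, then walks only the overloaded teams (more than 2 appearances) and increments each of their slots, touching the matrix only where incoherences exist.
import Mathlib
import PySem

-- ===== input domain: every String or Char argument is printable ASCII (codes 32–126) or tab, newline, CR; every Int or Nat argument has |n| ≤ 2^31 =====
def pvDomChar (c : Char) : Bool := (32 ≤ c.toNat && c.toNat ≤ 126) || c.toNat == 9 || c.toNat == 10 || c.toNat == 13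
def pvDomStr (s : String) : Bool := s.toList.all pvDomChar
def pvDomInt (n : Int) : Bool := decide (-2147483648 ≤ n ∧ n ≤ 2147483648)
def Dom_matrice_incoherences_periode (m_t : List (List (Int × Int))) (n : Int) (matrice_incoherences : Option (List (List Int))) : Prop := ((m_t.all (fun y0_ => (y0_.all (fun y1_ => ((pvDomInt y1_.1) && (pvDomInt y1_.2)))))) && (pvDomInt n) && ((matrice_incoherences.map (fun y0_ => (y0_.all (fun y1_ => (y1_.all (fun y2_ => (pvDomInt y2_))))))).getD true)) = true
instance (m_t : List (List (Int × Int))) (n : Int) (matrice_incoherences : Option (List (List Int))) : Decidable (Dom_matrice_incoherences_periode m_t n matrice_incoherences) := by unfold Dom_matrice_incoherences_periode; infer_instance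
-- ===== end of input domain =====

-- B replaces A's per-slot endpoint scoring by a team-driven distribution (slot lists per team,
-- incrementing only overloaded teams' slots); objective: alternative decomposition, same return values.
-- Both the Python A and Python B mutate the passed-in matrix in place; the equivalence proved here is
-- about the RETURN value (both perform net-identical updates: A also adds 0 to untouched cells).


-- Python list indexing at an in-range possibly-negative index (lst[i]; callers stay in range via Pre_)
def pvAdjIdx (len : Nat) (i : Int) : Nat := if i < 0 then (i + len).toNat else i.toNat

-- shared initialization: `if not matrice_incoherences: matrice_incoherences = [[0]*(n-1) for _ in range(n//2)]`
def pvInitMat (n : Int) (mo : Option (List (List Int))) : List (List Int) :=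
  match mo with
  | none => List.replicate (PySem.Int.floordiv n 2).toNat (List.replicate (n - 1).toNat (0 : Int))
  | some m => if m.isEmpty then List.replicate (PySem.Int.floordiv n 2).toNat (List.replicate (n - 1).toNat (0 : Int)) else m

-- ===== PORT A =====
def matrice_incoherences_periode (m_t : List (List (Int × Int))) (n : Int) (matrice_incoherences : Option (List (List Int))) : List (List Int) :=
  (PySem.List.enumerate m_t).foldl (fun mat pp =>
    let num_p := pp.1
    let periode := pp.2
    let present := periode.foldl (fun pr ab =>
      let pr1 := pr.modify (pvAdjIdx pr.length ab.1) (· + 1)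
      pr1.modify (pvAdjIdx pr1.length ab.2) (· + 1)) (List.replicate n.toNat (0 : Int))
    let inco := present.map (fun v => if v ≤ 2 then (0 : Int) else v - 2)
    (PySem.List.enumerate periode).foldl (fun mat sp =>
      let d : Int := (if 0 < inco.getD (pvAdjIdx inco.length sp.2.1) 0 then 1 else 0)
                   + (if 0 < inco.getD (pvAdjIdx inco.length sp.2.2) 0 then 1 else 0)
      mat.modify num_p.toNat (fun row => row.modify sp.1.toNat (· + d))) mat)
    (pvInitMat n matrice_incoherences)

-- ===== PORT B =====
def matrice_incoherences_periode_alt (m_t : List (List (Int × Int))) (n : Int) (matrice_incoherences : Option (List (List Int))) : List (List Int) :=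
  (PySem.List.enumerate m_t).foldl (fun mat pp =>
    let num_p := pp.1
    let periode := pp.2
    let slots := (PySem.List.enumerate periode).foldl (fun sl sp =>
      let sl1 := sl.modify (pvAdjIdx sl.length sp.2.1) (· ++ [sp.1.toNat])
      sl1.modify (pvAdjIdx sl1.length sp.2.2) (· ++ [sp.1.toNat])) (List.replicate n.toNat ([] : List Nat))
    slots.foldl (fun mat ts =>
      if 2 < ts.length then
        ts.foldl (fun mat s => mat.modify num_p.toNat (fun row => row.modify s (· + 1))) mat
      else mat) mat)
    (pvInitMat n matrice_incoherences)

-- ===== PRECONDITION & SPEC =====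
-- Pre_ = exactly the inputs where Python A raises no exception: every team index is an in-range
-- (possibly negative) index into the size-n presence list, and for every non-empty period the
-- (possibly reinitialized) matrix has a long-enough row at that period's position.
def Pre_matrice_incoherences_periode (m_t : List (List (Int × Int))) (n : Int) (matrice_incoherences : Option (List (List Int))) : Prop :=
  m_t.zipIdx.Forall (fun pi =>
    pi.1.Forall (fun ab => -n ≤ ab.1 ∧ ab.1 < n ∧ -n ≤ ab.2 ∧ ab.2 < n) ∧
    (pi.1 = [] ∨ (pi.2 < (pvInitMat n matrice_incoherences).length ∧
                  pi.1.length ≤ ((pvInitMat n matrice_incoherences)[pi.2]?.getD []).length)))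
instance (m_t : List (List (Int × Int))) (n : Int) (matrice_incoherences : Option (List (List Int))) : Decidable (Pre_matrice_incoherences_periode m_t n matrice_incoherences) := by unfold Pre_matrice_incoherences_periode; infer_instance

def pvWitness_matrice_incoherences_periode : (List (List (Int × Int))) × Int × Option (List (List Int)) :=
  ([[(0, 1), (0, 2), (0, 3)]], 4, none)

def Spec_matrice_incoherences_periode (m_t : List (List (Int × Int))) (n : Int) (matrice_incoherences : Option (List (List Int))) (out : List (List Int)) : Prop := out = matrice_incoherences_periode_alt m_t n matrice_incoherences
instance (m_t : List (List (Int × Int))) (n : Int) (matrice_incoherences : Option (List (List Int))) (out : List (List Int)) : Decidable (Spec_matrice_incoherences_periode m_t n matrice_incoherences out) := by unfold Spec_matrice_incoherences_periode; infer_instance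

-- ===== CLAIM (what is proved, stated in full; the proofs are below) =====
def Claim_equal_matrice_incoherences_periode : Prop := ∀ (m_t : List (List (Int × Int))) (n : Int) (matrice_incoherences : Option (List (List Int))), Dom_matrice_incoherences_periode m_t n matrice_incoherences → Pre_matrice_incoherences_periode m_t n matrice_incoherences → Spec_matrice_incoherences_periode m_t n matrice_incoherences (matrice_incoherences_periode m_t n matrice_incoherences)

-- ===== LEMMAS AND PROOFS =====
def pvScat {α ν : Type} (op : ν → α → α) (r : List α) (L : List (Nat × ν)) : List α :=
  L.foldl (fun r sv => r.modify sv.1 (op sv.2)) r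
def pvPair (P : List (Int × Int)) (i : Nat) : Int × Int := P.getD i ((0 : Int), (0 : Int))
def pvLS (N : Nat) (P : List (Int × Int)) : List (Nat × Nat) :=
  (List.range P.length).flatMap (fun i =>
    [(pvAdjIdx N (pvPair P i).1, i), (pvAdjIdx N (pvPair P i).2, i)])
def pvOcc (N : Nat) (P : List (Int × Int)) (t : Nat) : List Nat :=
  (pvLS N P).filterMap (fun sv => if sv.1 = t then some sv.2 else none)
def pvPresent (N : Nat) (P : List (Int × Int)) : List Int :=
  P.foldl (fun pr ab =>
    let pr1 := pr.modify (pvAdjIdx pr.length ab.1) (· + 1)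
    pr1.modify (pvAdjIdx pr1.length ab.2) (· + 1)) (List.replicate N (0 : Int))
def pvInco (N : Nat) (P : List (Int × Int)) : List Int :=
  (pvPresent N P).map (fun v => if v ≤ 2 then (0 : Int) else v - 2)
def pvSlots (N : Nat) (P : List (Int × Int)) : List (List Nat) :=
  (PySem.List.enumerate P).foldl (fun sl sp =>
    let sl1 := sl.modify (pvAdjIdx sl.length sp.2.1) (· ++ [sp.1.toNat])
    sl1.modify (pvAdjIdx sl1.length sp.2.2) (· ++ [sp.1.toNat])) (List.replicate N ([] : List Nat))

theorem pvEnum_eq {α : Type} (xs : List α) (d : α) :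
    PySem.List.enumerate xs = (List.range xs.length).map (fun (i : Nat) => ((i : Int), xs.getD i d)) := by
  rw [PySem.List.enumerate_eq_map_pyRange xs d]
  have : PySem.List.len xs = (xs.length : Int) := by simp [PySem.List.len_eq]
  rw [this, PySem.List.pyRange_zero_nat, List.map_map]
  apply List.ext_getElem?
  intro i
  simp only [List.getElem?_map]
  by_cases h : i < xs.length
  · rw [List.getElem?_range h]
    simp [PySem.List.pyGetD_natCast, Function.comp]
  · rw [List.getElem?_eq_none (l := List.range xs.length) (by simpa using h)]
    simp

theorem pvScat_length {α ν : Type} (op : ν → α → α) (L : List (Nat × ν)) (r : List α) :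
    (pvScat op r L).length = r.length := by
  induction L generalizing r with
  | nil => rfl
  | cons sv t ih => simp only [pvScat, List.foldl_cons] at *; rw [ih, List.length_modify]

theorem pvMap_eq_range {β : Type} (P : List (Int × Int)) (F : (Int × Int) → β) :
    P.map F = (List.range P.length).map (fun i => F (pvPair P i)) := by
  apply List.ext_getElem?
  intro i
  simp only [List.getElem?_map]
  by_cases h : i < P.length
  · rw [List.getElem?_range h, List.getElem?_eq_getElem h]
    simp [pvPair, List.getD_eq_getElem?_getD, List.getElem?_eq_getElem h]
  · rw [List.getElem?_eq_none (l := List.range P.length) (by simpa using h),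
        List.getElem?_eq_none (l := P) (by omega)]
    simp

theorem pvPresent_aux (P : List (Int × Int)) :
    ∀ pr : List Int,
      P.foldl (fun pr ab =>
        let pr1 := pr.modify (pvAdjIdx pr.length ab.1) (· + 1)
        pr1.modify (pvAdjIdx pr1.length ab.2) (· + 1)) pr
      = pvScat (fun d x => x + d) pr
          (P.flatMap (fun ab => [(pvAdjIdx pr.length ab.1, (1 : Int)), (pvAdjIdx pr.length ab.2, 1)])) := by
  induction P with
  | nil => intro pr; rfl
  | cons ab t ih =>
    intro pr
    simp only [List.foldl_cons, List.flatMap_cons]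
    rw [ih]
    simp only [List.length_modify, pvScat, List.foldl_append, List.foldl_cons, List.foldl_nil]

theorem pvSlots_aux (P : List (Int × Int)) (idx : List Nat) :
    ∀ sl : List (List Nat),
      idx.foldl (fun sl i =>
        let sl1 := sl.modify (pvAdjIdx sl.length (pvPair P i).1) (· ++ [i])
        sl1.modify (pvAdjIdx sl1.length (pvPair P i).2) (· ++ [i])) sl
      = pvScat (fun v x => x ++ [v]) sl
          (idx.flatMap (fun i => [(pvAdjIdx sl.length (pvPair P i).1, i), (pvAdjIdx sl.length (pvPair P i).2, i)])) := by
  induction idx with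
  | nil => intro sl; rfl
  | cons i t ih =>
    intro sl
    simp only [List.foldl_cons, List.flatMap_cons]
    rw [ih]
    simp only [List.length_modify, pvScat, List.foldl_append, List.foldl_cons, List.foldl_nil]

theorem pvScat_getElem?_add (L : List (Nat × Int)) (row : List Int) (j : Nat) :
    (pvScat (fun d x => x + d) row L)[j]? =
      row[j]?.map (· + (L.map (fun sd => if sd.1 = j then sd.2 else 0)).sum) := by
  induction L generalizing row with
  | nil => cases h : row[j]? <;> simp [pvScat, h]
  | cons sd t ih =>
    simp only [pvScat, List.foldl_cons] at *
    rw [ih]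
    rw [List.getElem?_modify]
    cases h : row[j]? <;> by_cases hs : sd.1 = j <;> simp [hs] <;> ring

theorem pvScat_getElem?_app {α : Type} (L : List (Nat × α)) (sl : List (List α)) (j : Nat) :
    (pvScat (fun v x => x ++ [v]) sl L)[j]? =
      sl[j]?.map (· ++ L.filterMap (fun sv => if sv.1 = j then some sv.2 else none)) := by
  induction L generalizing sl with
  | nil => cases h : sl[j]? <;> simp [pvScat, h]
  | cons sv t ih =>
    simp only [pvScat, List.foldl_cons] at *
    rw [ih]
    rw [List.getElem?_modify]
    cases h : sl[j]? <;> by_cases hs : sv.1 = j <;> simp [hs]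

theorem pvModify_modify {α : Type} (l : List α) (i : Nat) (f g : α → α) :
    (l.modify i f).modify i g = l.modify i (fun x => g (f x)) := by
  apply List.ext_getElem?
  intro j
  simp only [List.getElem?_modify]
  cases l[j]? <;> by_cases h : i = j <;> simp [h]

theorem pvModify_id {α : Type} (l : List α) (i : Nat) : l.modify i (fun x => x) = l := by
  apply List.ext_getElem?
  intro j
  simp only [List.getElem?_modify]
  cases l[j]? <;> by_cases h : i = j <;> simp [h]

theorem pvHoist {β : Type} (L : List β) (p : Nat) (f : β → List Int → List Int) :
    ∀ mat : List (List Int),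
      L.foldl (fun m b => m.modify p (f b)) mat
        = mat.modify p (fun row => L.foldl (fun r b => f b r) row) := by
  induction L with
  | nil => intro mat; simp [pvModify_id]
  | cons b t ih =>
    intro mat
    simp only [List.foldl_cons]
    rw [ih, pvModify_modify]

theorem pvHoistB (slots : List (List Nat)) (p : Nat) (mat : List (List Int)) :
    slots.foldl (fun m ts =>
        if 2 < ts.length then
          ts.foldl (fun m s => m.modify p (fun row => row.modify s (· + 1))) m
        else m) mat
      = mat.modify p (fun row => slots.foldl (fun r ts =>
          if 2 < ts.length then ts.foldl (fun r s => r.modify s (· + 1)) r else r) row) := by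
  induction slots generalizing mat with
  | nil => simp [pvModify_id]
  | cons ts t ih =>
    simp only [List.foldl_cons]
    by_cases h : 2 < ts.length
    · simp only [h, if_pos]
      rw [pvHoist, ih, pvModify_modify]
    · simp only [h, if_false]
      rw [ih]

theorem pvSum_range_indicator (F : Nat → Int) (j m : Nat) :
    ((List.range m).map (fun i => if i = j then F i else 0)).sum = if j < m then F j else 0 := by
  induction m with
  | zero => simp
  | succ m ih =>
    rw [List.range_succ, List.map_append, List.sum_append, ih]
    by_cases h1 : j < m <;> by_cases h2 : m = j <;> simp [h1, h2] <;> try omega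

theorem pvSum_flatMap_int {γ : Type} (L : List γ) (f : γ → List Int) :
    (L.flatMap f).sum = (L.map (fun c => (f c).sum)).sum := by
  induction L with
  | nil => simp
  | cons c t ih => simp [List.flatMap_cons, List.sum_append, ih]

theorem pvFilterMap_ind_sum (L : List (Nat × Nat)) (t j : Nat) :
    ((L.filterMap (fun sv => if sv.1 = t then some sv.2 else none)).map
        (fun s => if s = j then (1 : Int) else 0)).sum
      = (L.map (fun sv => if sv.1 = t ∧ sv.2 = j then (1 : Int) else 0)).sum := by
  induction L with
  | nil => simp
  | cons sv l ih =>
    rw [List.filterMap_cons]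
    by_cases h1 : sv.1 = t <;> by_cases h2 : sv.2 = j <;> simp [h1, h2, ih]

theorem pvFilterMap_len_sum (L : List (Nat × Nat)) (t : Nat) :
    (L.map (fun sv => if sv.1 = t then (1 : Int) else 0)).sum
      = ((L.filterMap (fun sv => if sv.1 = t then some sv.2 else none)).length : Int) := by
  induction L with
  | nil => simp
  | cons sv l ih =>
    by_cases h : sv.1 = t <;> simp [h, ih] <;> try ring

theorem pvSlots_eq (N : Nat) (P : List (Int × Int)) :
    pvSlots N P = pvScat (fun v x => x ++ [v]) (List.replicate N ([] : List Nat)) (pvLS N P) := by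
  unfold pvSlots
  rw [pvEnum_eq P ((0 : Int), (0 : Int)), List.foldl_map]
  simp only [Int.toNat_natCast]
  have h := pvSlots_aux P (List.range P.length) (List.replicate N ([] : List Nat))
  simp only [List.length_replicate] at h
  exact h

theorem pvSlots_map (N : Nat) (P : List (Int × Int)) :
    pvSlots N P = (List.range N).map (pvOcc N P) := by
  rw [pvSlots_eq]
  apply List.ext_getElem?
  intro t
  rw [pvScat_getElem?_app, List.getElem?_replicate, List.getElem?_map]
  by_cases h : t < N
  · rw [List.getElem?_range h]
    simp [pvOcc, h]
  · rw [List.getElem?_eq_none (l := List.range N) (by simpa using h)]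
    simp [h]

theorem pvPresent_eq (N : Nat) (P : List (Int × Int)) :
    pvPresent N P = pvScat (fun d x => x + d) (List.replicate N (0 : Int))
      (P.flatMap (fun ab => [(pvAdjIdx N ab.1, (1 : Int)), (pvAdjIdx N ab.2, 1)])) := by
  unfold pvPresent
  have h := pvPresent_aux P (List.replicate N (0 : Int))
  simp only [List.length_replicate] at h
  exact h

theorem pvPresent_getElem? (N : Nat) (P : List (Int × Int)) (t : Nat) :
    (pvPresent N P)[t]? = if t < N then some (((pvOcc N P t).length : Int)) else none := by
  rw [pvPresent_eq, pvScat_getElem?_add, List.getElem?_replicate]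
  by_cases h : t < N
  · simp only [h, if_pos, Option.map_some]
    congr 1
    rw [zero_add]
    have hocc : ((pvOcc N P t).length : Int)
        = ((pvLS N P).map (fun sv => if sv.1 = t then (1 : Int) else 0)).sum := by
      rw [pvFilterMap_len_sum]
      rfl
    rw [hocc]
    unfold pvLS
    rw [List.map_flatMap, List.map_flatMap, pvSum_flatMap_int, pvSum_flatMap_int]
    rw [pvMap_eq_range P (fun ab => (List.map (fun sd => if sd.1 = t then sd.2 else 0)
      [(pvAdjIdx N ab.1, (1 : Int)), (pvAdjIdx N ab.2, 1)]).sum)]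
    congr 1
  · simp [h]

theorem pvInco_length (N : Nat) (P : List (Int × Int)) : (pvInco N P).length = N := by
  rw [pvInco, List.length_map, pvPresent_eq, pvScat_length, List.length_replicate]

theorem pvInco_pos (N : Nat) (P : List (Int × Int)) (t : Nat) :
    (0 < (pvInco N P).getD t 0) ↔ (t < N ∧ 2 < (pvOcc N P t).length) := by
  rw [List.getD_eq_getElem?_getD, pvInco, List.getElem?_map, pvPresent_getElem?]
  by_cases h : t < N
  · simp only [h, if_pos, Option.map_some, Option.getD_some, true_and]
    split_ifs with h2
    · constructor
      · intro hx; omega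
      · intro hx
        exfalso
        have : ((pvOcc N P t).length : Int) ≤ 2 := h2
        omega
    · constructor
      · intro hx
        have : ¬ ((pvOcc N P t).length : Int) ≤ 2 := h2
        omega
      · intro hx; push_cast at h2 ⊢; omega
  · simp [h]

theorem pvOcc_sum (N : Nat) (P : List (Int × Int)) (t j : Nat) :
    ((pvOcc N P t).map (fun s => if s = j then (1 : Int) else 0)).sum
      = if j < P.length then
          ((if pvAdjIdx N (pvPair P j).1 = t then 1 else 0)
            + (if pvAdjIdx N (pvPair P j).2 = t then (1 : Int) else 0)) else 0 := by
  unfold pvOcc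
  rw [pvFilterMap_ind_sum]
  unfold pvLS
  rw [List.map_flatMap, pvSum_flatMap_int]
  have hfun : ∀ i : Nat,
      ((([(pvAdjIdx N (pvPair P i).1, i), (pvAdjIdx N (pvPair P i).2, i)] : List (Nat × Nat)).map
         (fun sv => if sv.1 = t ∧ sv.2 = j then (1 : Int) else 0)).sum)
      = (if i = j then ((if pvAdjIdx N (pvPair P i).1 = t then 1 else 0)
            + (if pvAdjIdx N (pvPair P i).2 = t then (1 : Int) else 0)) else 0) := by
    intro i
    by_cases hij : i = j <;> by_cases h1 : pvAdjIdx N (pvPair P i).1 = t <;>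
      by_cases h2 : pvAdjIdx N (pvPair P i).2 = t <;> simp [hij, h1, h2]
  rw [show ((fun c => (List.map (fun sv => if sv.1 = t ∧ sv.2 = j then (1:Int) else 0)
        [(pvAdjIdx N (pvPair P c).1, c), (pvAdjIdx N (pvPair P c).2, c)]).sum))
      = (fun i => if i = j then ((if pvAdjIdx N (pvPair P i).1 = t then 1 else 0)
            + (if pvAdjIdx N (pvPair P i).2 = t then (1 : Int) else 0)) else 0) from funext hfun]
  rw [pvSum_range_indicator]

def pvTA (N : Nat) (P : List (Int × Int)) (i : Nat) : Int :=
  (if 0 < (pvInco N P).getD (pvAdjIdx (pvInco N P).length (pvPair P i).1) 0 then 1 else 0)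
  + (if 0 < (pvInco N P).getD (pvAdjIdx (pvInco N P).length (pvPair P i).2) 0 then 1 else 0)

def pvLB (N : Nat) (P : List (Int × Int)) : List (Nat × Int) :=
  (List.range N).flatMap (fun t =>
    if 2 < (pvOcc N P t).length then (pvOcc N P t).map (fun s => (s, (1 : Int))) else [])

theorem pvTA_eq (N : Nat) (P : List (Int × Int)) (j : Nat) :
    pvTA N P j
      = (if pvAdjIdx N (pvPair P j).1 < N ∧ 2 < (pvOcc N P (pvAdjIdx N (pvPair P j).1)).length then 1 else 0)
      + (if pvAdjIdx N (pvPair P j).2 < N ∧ 2 < (pvOcc N P (pvAdjIdx N (pvPair P j).2)).length then (1 : Int) else 0) := by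
  unfold pvTA
  rw [pvInco_length]
  simp only [pvInco_pos]

theorem pvSA (N : Nat) (P : List (Int × Int)) (j : Nat) :
    (((List.range P.length).map (fun i => (i, pvTA N P i))).map
        (fun sd => if sd.1 = j then sd.2 else 0)).sum
      = if j < P.length then pvTA N P j else 0 := by
  rw [List.map_map]
  rw [show ((fun (sd : Nat × Int) => if sd.1 = j then sd.2 else 0) ∘ (fun i => (i, pvTA N P i)))
      = (fun i => if i = j then pvTA N P i else 0) from funext (fun i => by simp [Function.comp])]
  exact pvSum_range_indicator _ j _

theorem pvSB (N : Nat) (P : List (Int × Int)) (j : Nat) :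
    ((pvLB N P).map (fun sd => if sd.1 = j then sd.2 else 0)).sum
      = if j < P.length then
          ((if pvAdjIdx N (pvPair P j).1 < N ∧ 2 < (pvOcc N P (pvAdjIdx N (pvPair P j).1)).length then 1 else 0)
          + (if pvAdjIdx N (pvPair P j).2 < N ∧ 2 < (pvOcc N P (pvAdjIdx N (pvPair P j).2)).length then (1 : Int) else 0))
        else 0 := by
  unfold pvLB
  rw [List.map_flatMap, pvSum_flatMap_int]
  have hterm : ∀ t : Nat,
      ((fun c => (List.map (fun sd => if sd.1 = j then sd.2 else 0)
          (if 2 < (pvOcc N P c).length then (pvOcc N P c).map (fun s => (s, (1 : Int))) else [])).sum) ∘ id) t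
      = (if 2 < (pvOcc N P t).length then
          (if j < P.length then
            ((if pvAdjIdx N (pvPair P j).1 = t then 1 else 0)
              + (if pvAdjIdx N (pvPair P j).2 = t then (1 : Int) else 0)) else 0) else 0) := by
    intro t
    by_cases h : 2 < (pvOcc N P t).length
    · simp only [Function.comp, id, h, if_pos, List.map_map]
      rw [show ((fun (sd : Nat × Int) => if sd.1 = j then sd.2 else 0) ∘ (fun s => (s, (1 : Int))))
          = (fun s => if s = j then (1 : Int) else 0) from funext (fun s => by simp [Function.comp])]
      exact pvOcc_sum N P t j
    · simp [h]
  simp only [Function.comp, id] at hterm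
  rw [show (fun c => (List.map (fun sd => if sd.1 = j then sd.2 else 0)
        (if 2 < (pvOcc N P c).length then (pvOcc N P c).map (fun s => (s, (1 : Int))) else [])).sum)
      = (fun t => (if 2 < (pvOcc N P t).length then
          (if j < P.length then
            ((if pvAdjIdx N (pvPair P j).1 = t then 1 else 0)
              + (if pvAdjIdx N (pvPair P j).2 = t then (1 : Int) else 0)) else 0) else 0)) from funext hterm]
  by_cases hj : j < P.length
  · simp only [hj, if_pos]
    have hsplit : ∀ t : Nat,
        (if 2 < (pvOcc N P t).length then
            ((if pvAdjIdx N (pvPair P j).1 = t then 1 else 0)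
              + (if pvAdjIdx N (pvPair P j).2 = t then (1 : Int) else 0)) else 0)
        = (if t = pvAdjIdx N (pvPair P j).1 then (if 2 < (pvOcc N P t).length then 1 else 0) else 0)
          + (if t = pvAdjIdx N (pvPair P j).2 then (if 2 < (pvOcc N P t).length then (1 : Int) else 0) else 0) := by
      intro t
      by_cases h1 : pvAdjIdx N (pvPair P j).1 = t <;> by_cases h2 : pvAdjIdx N (pvPair P j).2 = t <;>
        by_cases ho : 2 < (pvOcc N P t).length <;> simp [h1, h2, ho, eq_comm] <;> omega
    rw [show (fun t => (if 2 < (pvOcc N P t).length then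
            ((if pvAdjIdx N (pvPair P j).1 = t then 1 else 0)
              + (if pvAdjIdx N (pvPair P j).2 = t then (1 : Int) else 0)) else 0))
        = (fun t => (if t = pvAdjIdx N (pvPair P j).1 then (if 2 < (pvOcc N P t).length then 1 else 0) else 0)
          + (if t = pvAdjIdx N (pvPair P j).2 then (if 2 < (pvOcc N P t).length then (1 : Int) else 0) else 0))
        from funext hsplit]
    rw [PySem.List.sum_map_add_int]
    rw [pvSum_range_indicator (fun t => if 2 < (pvOcc N P t).length then 1 else 0) (pvAdjIdx N (pvPair P j).1) N]
    rw [pvSum_range_indicator (fun t => if 2 < (pvOcc N P t).length then (1 : Int) else 0) (pvAdjIdx N (pvPair P j).2) N]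
    by_cases hA : pvAdjIdx N (pvPair P j).1 < N <;> by_cases hB : pvAdjIdx N (pvPair P j).2 < N <;>
      by_cases o1 : 2 < (pvOcc N P (pvAdjIdx N (pvPair P j).1)).length <;>
      by_cases o2 : 2 < (pvOcc N P (pvAdjIdx N (pvPair P j).2)).length <;>
      simp [hA, hB, o1, o2]
  · simp [hj]

theorem pvRowB_aux (N : Nat) (P : List (Int × Int)) (T : List Nat) :
    ∀ row : List Int,
      T.foldl (fun r t => if 2 < (pvOcc N P t).length then
          (pvOcc N P t).foldl (fun r s => r.modify s (· + 1)) r else r) row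
      = pvScat (fun d x => x + d) row
          (T.flatMap (fun t => if 2 < (pvOcc N P t).length then
            (pvOcc N P t).map (fun s => (s, (1 : Int))) else [])) := by
  induction T with
  | nil => intro row; rfl
  | cons t ts ih =>
    intro row
    simp only [List.foldl_cons, List.flatMap_cons]
    rw [ih]
    by_cases h : 2 < (pvOcc N P t).length
    · simp only [h, if_pos]
      rw [show ((pvOcc N P t).foldl (fun r s => r.modify s (· + 1)) row)
          = pvScat (fun d x => x + d) row ((pvOcc N P t).map (fun s => (s, (1 : Int)))) from by
            rw [pvScat, List.foldl_map]]
      rw [pvScat, pvScat, pvScat, List.foldl_append]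
    · simp only [h, if_false, List.nil_append]

theorem pvRow (N : Nat) (P : List (Int × Int)) (row : List Int) :
    (List.range P.length).foldl (fun r i => r.modify i (· + pvTA N P i)) row
      = (pvSlots N P).foldl (fun r ts =>
          if 2 < ts.length then ts.foldl (fun r s => r.modify s (· + 1)) r else r) row := by
  rw [pvSlots_map, List.foldl_map, pvRowB_aux]
  rw [show ((List.range P.length).foldl (fun r i => r.modify i (· + pvTA N P i)) row)
      = pvScat (fun d x => x + d) row ((List.range P.length).map (fun i => (i, pvTA N P i))) from by
        rw [pvScat, List.foldl_map]]
  apply List.ext_getElem?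
  intro j
  rw [pvScat_getElem?_add, pvScat_getElem?_add]
  rw [pvSA]
  rw [show ((List.range N).flatMap (fun t => if 2 < (pvOcc N P t).length then
        (pvOcc N P t).map (fun s => (s, (1 : Int))) else [])) = pvLB N P from rfl]
  rw [pvSB, pvTA_eq]

theorem pvPeriod (n : Int) (pp : Int × List (Int × Int)) (mat : List (List Int)) :
    (PySem.List.enumerate pp.2).foldl (fun mat sp =>
        mat.modify pp.1.toNat (fun row => row.modify sp.1.toNat
          (· + ((if 0 < (pvInco n.toNat pp.2).getD (pvAdjIdx (pvInco n.toNat pp.2).length sp.2.1) 0 then 1 else 0)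
              + (if 0 < (pvInco n.toNat pp.2).getD (pvAdjIdx (pvInco n.toNat pp.2).length sp.2.2) 0 then (1 : Int) else 0))))) mat
      = (pvSlots n.toNat pp.2).foldl (fun mat ts =>
          if 2 < ts.length then
            ts.foldl (fun mat s => mat.modify pp.1.toNat (fun row => row.modify s (· + 1))) mat
          else mat) mat := by
  have h1 : (PySem.List.enumerate pp.2).foldl (fun mat sp =>
        mat.modify pp.1.toNat (fun row => row.modify sp.1.toNat
          (· + ((if 0 < (pvInco n.toNat pp.2).getD (pvAdjIdx (pvInco n.toNat pp.2).length sp.2.1) 0 then 1 else 0)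
              + (if 0 < (pvInco n.toNat pp.2).getD (pvAdjIdx (pvInco n.toNat pp.2).length sp.2.2) 0 then (1 : Int) else 0))))) mat
      = mat.modify pp.1.toNat (fun row =>
          (List.range pp.2.length).foldl (fun r i => r.modify i (· + pvTA n.toNat pp.2 i)) row) := by
    rw [pvEnum_eq pp.2 ((0 : Int), (0 : Int)), List.foldl_map]
    simp only [Int.toNat_natCast]
    exact pvHoist (List.range pp.2.length) pp.1.toNat
      (fun i row => row.modify i (· + pvTA n.toNat pp.2 i)) mat
  rw [h1, pvHoistB]
  exact congrArg (mat.modify pp.1.toNat) (funext (fun row => pvRow n.toNat pp.2 row))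

-- ===== VERDICT (by name: the statement is the Claim_ definition above) =====
theorem matrice_incoherences_periode_spec : Claim_equal_matrice_incoherences_periode := by
  intro m_t n mo _hDom _hPre
  unfold Spec_matrice_incoherences_periode
  unfold matrice_incoherences_periode matrice_incoherences_periode_alt
  exact congrArg (fun f => List.foldl f (pvInitMat n mo) (PySem.List.enumerate m_t))
    (funext (fun mat => funext (fun pp => pvPeriod n pp mat)))
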